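-- pv_equiv track=rewrite | github.com/merma593/JoinedUp | ogmain.py | doublematch
-- ===== SOURCE A (Python) =====
-- def doublematch(word1, word2):
--     # Finds & Compares suffix and prefix of 2 words
--     # Checks if doubly linked
--     prefix = word1
--     suffix = word2
--     preLen = len(word1)
--     sufLen = len(word2)
--
--     if(preLen > sufLen):
--         prefix = prefix[preLen - sufLen:]
--     elif(preLen < sufLen):
--         suffix = suffix[:preLen]
--
--     while(suffix != prefix and len(suffix) > 0):
--         prefix = prefix[1:]
--         suffix = suffix[:len(suffix) - 1]
--
--     if(prefix == suffix):
--         if(len(prefix) < (preLen)/2 or len(prefix) < (sufLen)/2):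
--             return False
--         return True
-- ===== SOURCE B (Python) =====
-- def doublematch(word1, word2):
--     # A match of length k (suffix of word1 == prefix of word2) passes A's final
--     # threshold iff 2*k >= len(word1) and 2*k >= len(word2); since the threshold is
--     # monotone in k, the maximum overlap passes iff ANY k in the admissible upper
--     # range matches.  So scan only those k for existence, no maximum needed.
--     n1, n2 = len(word1), len(word2)
--     lo = (max(n1, n2) + 1) // 2
--     return any(word2[:k] == word1[n1 - k:] for k in range(lo, min(n1, n2) + 1))
-- ===== Notes on version B (the rewrite author's own statement) =====
-- stated objective: simpler
-- what changed: A shrinks both slices in a loop to compute the MAXIMUM overlap and then applies a half-length threshold test; B folds the threshold into the candidate range and does a single existence scan over only the overlap lengths k with 2k >= max(len1,len2), computing no maximum and no post-hoc test.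
import Mathlib
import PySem

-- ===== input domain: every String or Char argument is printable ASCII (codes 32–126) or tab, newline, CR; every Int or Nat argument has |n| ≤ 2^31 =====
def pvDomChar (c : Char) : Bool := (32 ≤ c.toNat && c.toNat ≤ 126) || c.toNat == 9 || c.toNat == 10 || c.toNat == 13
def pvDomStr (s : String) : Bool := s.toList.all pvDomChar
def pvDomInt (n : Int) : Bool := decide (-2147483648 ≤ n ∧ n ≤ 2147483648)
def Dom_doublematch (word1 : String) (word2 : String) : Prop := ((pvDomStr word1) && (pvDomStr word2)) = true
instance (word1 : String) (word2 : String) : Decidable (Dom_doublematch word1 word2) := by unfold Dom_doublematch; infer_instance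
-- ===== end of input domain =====

-- B replaces A's shrink-until-equal loop + post-hoc half-length test by a single existence
-- scan over only the overlap lengths that meet the threshold (objective: simpler).

-- ===== PORT A =====
-- A's while-loop: shrink prefix from the front and suffix from the back until equal or empty.
def pvLoopA (pr sf : List Char) : List Char × List Char :=
  if sf ≠ pr ∧ sf.length > 0 then
    pvLoopA (pr.drop 1) (sf.take (sf.length - 1))
  else (pr, sf)
termination_by sf.length
decreasing_by
  rename_i h
  obtain ⟨-, h2⟩ := h
  simp [List.length_take]
  omega

def doublematch (word1 : String) (word2 : String) : Bool :=
  let w1 := word1.toList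
  let w2 := word2.toList
  let preLen := w1.length
  let sufLen := w2.length
  -- prefix = word1; suffix = word2; the two trimming slices (both indices nonnegative)
  let prefix0 := if preLen > sufLen then w1.drop (preLen - sufLen) else w1
  let suffix0 := if preLen < sufLen then w2.take preLen else w2
  let res := pvLoopA prefix0 suffix0
  if res.1 = res.2 then
    -- len(prefix) < preLen/2 (float division) is exactly 2*len(prefix) < preLen for ints
    if 2 * res.1.length < preLen ∨ 2 * res.1.length < sufLen then false else true
  else false  -- Python falls through to None here; unreachable (both sides shrink in lockstep)

-- ===== PORT B =====
def doublematch_alt (word1 : String) (word2 : String) : Bool :=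
  let w1 := word1.toList
  let w2 := word2.toList
  let n1 := w1.length
  let n2 := w2.length
  let lo := (max n1 n2 + 1) / 2
  -- any(word2[:k] == word1[n1-k:] for k in range(lo, min(n1,n2)+1)); all indices nonnegative
  (List.range' lo (min n1 n2 + 1 - lo)).any (fun k => w2.take k == w1.drop (n1 - k))

-- ===== PRECONDITION & SPEC =====
def Spec_doublematch (word1 : String) (word2 : String) (out : Bool) : Prop := out = doublematch_alt word1 word2
instance (word1 : String) (word2 : String) (out : Bool) : Decidable (Spec_doublematch word1 word2 out) := by unfold Spec_doublematch; infer_instance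

-- ===== CLAIM (what is proved, stated in full; the proofs are below) =====
def Claim_equal_doublematch : Prop := ∀ (word1 : String) (word2 : String), Dom_doublematch word1 word2 → Spec_doublematch word1 word2 (doublematch word1 word2)

-- ===== LEMMAS AND PROOFS =====

-- largest k ≤ j such that the length-k suffix of w1 equals the length-k prefix of w2
def pvBest (w1 w2 : List Char) : Nat → Nat
  | 0 => 0
  | j+1 => if w2.take (j+1) = w1.drop (w1.length - (j+1)) then j + 1 else pvBest w1 w2 j

lemma pvBest_le (w1 w2 : List Char) (j : Nat) : pvBest w1 w2 j ≤ j := by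
  induction j with
  | zero => simp [pvBest]
  | succ j ih => unfold pvBest; split <;> omega

lemma pvBest_match (w1 w2 : List Char) (j : Nat) :
    w2.take (pvBest w1 w2 j) = w1.drop (w1.length - pvBest w1 w2 j) := by
  induction j with
  | zero => simp [pvBest]
  | succ j ih => unfold pvBest; split <;> simp_all

lemma pvBest_max (w1 w2 : List Char) (j : Nat) :
    ∀ k, k ≤ j → w2.take k = w1.drop (w1.length - k) → k ≤ pvBest w1 w2 j := by
  induction j with
  | zero => intro k hk _; omega
  | succ j ih =>
    intro k hk hm
    unfold pvBest
    split
    · omega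
    · rename_i hne
      rcases Nat.lt_or_ge k (j+1) with h | h
      · exact ih k (by omega) hm
      · have hkj : k = j + 1 := by omega
        subst hkj
        exact absurd hm hne

lemma pvBest_succ (w1 w2 : List Char) (j : Nat) :
    pvBest w1 w2 (j+1) =
      if w2.take (j+1) = w1.drop (w1.length - (j+1)) then j + 1 else pvBest w1 w2 j := rfl

lemma pvLoopA_eq (w1 w2 : List Char) :
    ∀ j, j ≤ w1.length → j ≤ w2.length →
      pvLoopA (w1.drop (w1.length - j)) (w2.take j) =
        (w1.drop (w1.length - pvBest w1 w2 j), w2.take (pvBest w1 w2 j)) := by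
  intro j
  induction j with
  | zero =>
    intro _ _
    rw [pvLoopA.eq_def]
    simp [pvBest]
  | succ j ih =>
    intro h1 h2
    rw [pvLoopA.eq_def]
    have hlensf : (w2.take (j+1)).length = j + 1 := by
      simp [List.length_take]; omega
    by_cases heq : w2.take (j+1) = w1.drop (w1.length - (j+1))
    · have : ¬ (w2.take (j+1) ≠ w1.drop (w1.length - (j+1)) ∧ (w2.take (j+1)).length > 0) := by
        simp [heq]
      rw [if_neg this, pvBest_succ, if_pos heq]
    · have hcond : (w2.take (j+1) ≠ w1.drop (w1.length - (j+1)) ∧ (w2.take (j+1)).length > 0) := by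
        exact ⟨heq, by omega⟩
      rw [if_pos hcond]
      have hdrop : (w1.drop (w1.length - (j+1))).drop 1 = w1.drop (w1.length - j) := by
        rw [List.drop_drop]; congr 1; omega
      have htake : (w2.take (j+1)).take ((w2.take (j+1)).length - 1) = w2.take j := by
        rw [hlensf]; simp [List.take_take]
      rw [hdrop, htake, ih (by omega) (by omega), pvBest_succ, if_neg heq]

-- the two trimmed slices are exactly drop/take at m = min
lemma pvTrim (w1 w2 : List Char) :
    (if w1.length > w2.length then w1.drop (w1.length - w2.length) else w1) =
      w1.drop (w1.length - min w1.length w2.length) ∧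
    (if w1.length < w2.length then w2.take w1.length else w2) =
      w2.take (min w1.length w2.length) := by
  constructor
  · split
    · congr 1; omega
    · have : w1.length - min w1.length w2.length = 0 := by omega
      rw [this]; simp
  · split
    · congr 1; omega
    · have : min w1.length w2.length = w2.length := by omega
      rw [this]; simp

theorem pv_main (word1 word2 : String) :
    doublematch word1 word2 = doublematch_alt word1 word2 := by
  unfold doublematch doublematch_alt
  set w1 := word1.toList with hw1
  set w2 := word2.toList with hw2
  set n1 := w1.length with hn1
  set n2 := w2.length with hn2
  set m := min n1 n2 with hm
  obtain ⟨htr1, htr2⟩ := pvTrim w1 w2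
  simp only
  rw [htr1, htr2, pvLoopA_eq w1 w2 m (by omega) (by omega)]
  set K := pvBest w1 w2 m with hK
  have hKle : K ≤ m := pvBest_le w1 w2 m
  have hKmatch : w2.take K = w1.drop (n1 - K) := pvBest_match w1 w2 m
  have hlenK : (w1.drop (n1 - K)).length = K := by
    rw [List.length_drop]; omega
  rw [if_pos hKmatch.symm, hlenK]
  set lo := (max n1 n2 + 1) / 2 with hlo
  by_cases hth : 2 * K < n1 ∨ 2 * K < n2
  · rw [if_pos hth]
    symm
    rw [List.any_eq_false]
    intro k hk
    rw [List.mem_range'_1] at hk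
    simp only [beq_iff_eq]
    intro hmatch
    have hkK : k ≤ K := pvBest_max w1 w2 m k (by omega) hmatch
    omega
  · rw [if_neg hth]
    symm
    rw [List.any_eq_true]
    refine ⟨K, ?_, by simp only [beq_iff_eq]; exact hKmatch⟩
    rw [List.mem_range'_1]
    omega

-- ===== VERDICT (by name: the statement is the Claim_ definition above) =====
theorem doublematch_spec : Claim_equal_doublematch := by
  intro word1 word2 _
  unfold Spec_doublematch
  exact pv_main word1 word2
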